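-- pv_equiv track=rewrite | github.com/full-fish/algorithm-quiz | programmers/level2/광물캐기.py | solution
-- ===== SOURCE A (Python) =====
-- def solution(picks, minerals):
--     result = 0
--     arr = []
--     max_boundery = sum(picks) * 5
--     for i in range(0, len(minerals[:max_boundery]), 5):  # 5개씩 끊기
--         group = minerals[i : i + 5]
--         temp = [0, 0, 0]  # [다이아곡괭이, 철곡괭이, 돌곡괭이]
--         for e in group:
--             if e == "diamond":
--                 temp[0] += 1
--             elif e == "iron":
--                 temp[1] += 1
--             else:
--                 temp[2] += 1
--         arr.append(temp)
--         arr.sort(key=lambda x: (-x[0], -x[1], -x[2]))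
--     for x, y, z in arr:
--         if picks[0] > 0:
--             picks[0] -= 1
--             result += x + y + z
--         elif picks[1] > 0:
--             picks[1] -= 1
--             result += 5 * x + y + z
--         elif picks[2] > 0:
--             picks[2] -= 1
--             result += 25 * x + 5 * y + z
--
--     return result
-- ===== SOURCE B (Python) =====
-- def solution(picks, minerals):
--     # Like A, mutates `picks` in place (consumed pick counts are subtracted at the end).
--     limit = sum(picks) * 5
--     buckets = {}
--     for i in range(0, len(minerals[:limit]), 5):
--         g = minerals[i : i + 5]
--         d = g.count("diamond")
--         r = g.count("iron")
--         key = (d, r, len(g) - d - r)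
--         buckets[key] = buckets.get(key, 0) + 1
--     mult = [(1, 1, 1), (5, 1, 1), (25, 5, 1)]
--     rem = [picks[j] if j < len(picks) else 0 for j in range(3)]
--     tier = 0
--     total = 0
--     for d in range(5, -1, -1):
--         for r in range(5, -1, -1):
--             for s in range(5, -1, -1):
--                 cnt = buckets.get((d, r, s), 0)
--                 while cnt > 0 and tier < 3:
--                     if rem[tier] > 0:
--                         take = min(cnt, rem[tier])
--                         a, b, c = mult[tier]
--                         total += take * (a * d + b * r + c * s)
--                         rem[tier] -= take
--                         cnt -= take
--                     else:
--                         tier += 1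
--     for j in range(min(3, len(picks))):
--         picks[j] = rem[j]
--     return total
-- ===== Notes on version B (the rewrite author's own statement) =====
-- stated objective: alternative
-- what changed: A appends each 5-group's count triple to a list, re-sorts the list after every append, and consumes picks by scanning the sorted list with a stateful if/elif chain; B never sorts: it tallies the triples into a dict keyed by (diamond,iron,stone) and walks the finite 6x6x6 triple space in descending order, draining the pick tiers in batches per bucket (a counting/bucket pass replacing the comparison sort).
import Mathlib
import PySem

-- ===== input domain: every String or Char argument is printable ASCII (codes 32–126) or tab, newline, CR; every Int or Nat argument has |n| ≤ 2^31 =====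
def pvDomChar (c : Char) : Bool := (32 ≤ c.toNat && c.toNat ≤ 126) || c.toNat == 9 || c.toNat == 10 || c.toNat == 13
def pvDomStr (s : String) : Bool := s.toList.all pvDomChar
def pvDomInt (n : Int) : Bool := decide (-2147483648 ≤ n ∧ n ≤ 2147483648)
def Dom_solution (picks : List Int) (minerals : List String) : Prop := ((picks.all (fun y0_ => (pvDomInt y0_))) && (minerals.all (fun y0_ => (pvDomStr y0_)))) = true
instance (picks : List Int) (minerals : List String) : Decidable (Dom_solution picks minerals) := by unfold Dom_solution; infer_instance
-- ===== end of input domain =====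

-- B replaces A's sort-then-greedy-scan by a dict of group-triple counts drained by walking the
-- 6×6×6 triple space in descending order (no comparison sort); both Pythons mutate `picks` in
-- place identically — the equivalence proved here is about the return value.

-- ===== PORT A =====
-- hand port of list.sort(key=lambda x: (-x[0], -x[1], -x[2])): PySem.List.sorted takes a single
-- key with [LT]; this is the same stable insertion sort (cf. PySem.List.sorted_eq_foldl_insertBy),
-- with the lexicographic '<' on the 3-tuple key written out ('key a < key b' = pvTripLt a b);
-- exact because Python's tuple '<' is lexicographic and '-x' reverses Int order.
def pvTripLt (a b : Int × Int × Int) : Bool :=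
  decide (b.1 < a.1) || (a.1 == b.1 && (decide (b.2.1 < a.2.1) || (a.2.1 == b.2.1 && decide (b.2.2 < a.2.2))))

def pvSortDesc (l : List (Int × Int × Int)) : List (Int × Int × Int) :=
  l.foldl (fun acc x => PySem.List.insertBy pvTripLt x acc) []

-- the elif chain counting one group into temp = [dia, iron, stone]
def pvTempStep (t : Int × Int × Int) (e : String) : Int × Int × Int :=
  if e == "diamond" then (t.1 + 1, t.2.1, t.2.2)
  else if e == "iron" then (t.1, t.2.1 + 1, t.2.2)
  else (t.1, t.2.1, t.2.2 + 1)

-- the pick-consuming if/elif chain over (picks, result); picks[i] is pyGetD (in range wherever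
-- Python does not raise an IndexError — outside that Pre_ excludes the input)
def pvPickStep (st : List Int × Int) (t : Int × Int × Int) : List Int × Int :=
  if PySem.List.pyGetD st.1 0 0 > 0 then
    (st.1.set 0 (PySem.List.pyGetD st.1 0 0 - 1), st.2 + t.1 + t.2.1 + t.2.2)
  else if PySem.List.pyGetD st.1 1 0 > 0 then
    (st.1.set 1 (PySem.List.pyGetD st.1 1 0 - 1), st.2 + 5 * t.1 + t.2.1 + t.2.2)
  else if PySem.List.pyGetD st.1 2 0 > 0 then
    (st.1.set 2 (PySem.List.pyGetD st.1 2 0 - 1), st.2 + 25 * t.1 + 5 * t.2.1 + t.2.2)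
  else st

def solution (picks : List Int) (minerals : List String) : Int :=
  let maxBoundery := picks.sum * 5
  let arr := (PySem.List.pyRange 0 ((PySem.List.slice minerals none (some maxBoundery)).length) 5).foldl
    (fun arr i =>
      let group := PySem.List.slice minerals (some i) (some (i + 5))
      let temp := group.foldl pvTempStep ((0 : Int), (0 : Int), (0 : Int))
      pvSortDesc (arr ++ [temp])) []
  (arr.foldl pvPickStep (picks, (0 : Int))).2

-- ===== PORT B =====
-- a, b, c = mult[tier]  (mult = [(1,1,1),(5,1,1),(25,5,1)])
def pvMult (tier : Int) : Int × Int × Int :=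
  PySem.List.pyGetD [((1 : Int), (1 : Int), (1 : Int)), (5, 1, 1), (25, 5, 1)] tier (0, 0, 0)

-- the while loop 'while cnt > 0 and tier < 3: …'; fuel is only a totality guard: each
-- iteration either decreases cnt (take ≥ 1) or increases tier, so cnt.toNat + 3 steps suffice
def pvDrain : Nat → Int → Int → Int → Int → Int → List Int → Int → Int × List Int × Int
  | 0, _, _, _, _, tier, rem, total => (tier, rem, total)
  | fuel + 1, d, r, s, cnt, tier, rem, total =>
    if 0 < cnt ∧ tier < 3 then
      if 0 < PySem.List.pyGetD rem tier 0 then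
        let rt := PySem.List.pyGetD rem tier 0
        let take := min cnt rt
        pvDrain fuel d r s (cnt - take) tier (rem.set tier.toNat (rt - take))
          (total + take * ((pvMult tier).1 * d + (pvMult tier).2.1 * r + (pvMult tier).2.2 * s))
      else
        pvDrain fuel d r s cnt (tier + 1) rem total
    else (tier, rem, total)

def solution_alt (picks : List Int) (minerals : List String) : Int :=
  let limit := picks.sum * 5
  let buckets := (PySem.List.pyRange 0 ((PySem.List.slice minerals none (some limit)).length) 5).foldl
    (fun b i =>
      let g := PySem.List.slice minerals (some i) (some (i + 5))
      let d : Int := PySem.List.count g "diamond"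
      let r : Int := PySem.List.count g "iron"
      let key := (d, r, (g.length : Int) - d - r)
      b.insert key (b.getD key 0 + 1))
    (PySem.Dict.empty : PySem.Dict (Int × Int × Int) Int)
  let rem := (PySem.List.pyRange 0 3 1).map
    (fun j => if j < (picks.length : Int) then PySem.List.pyGetD picks j 0 else 0)
  let st := (PySem.List.pyRange 5 (-1) (-1)).foldl (fun st d =>
    (PySem.List.pyRange 5 (-1) (-1)).foldl (fun st r =>
      (PySem.List.pyRange 5 (-1) (-1)).foldl (fun st s =>
        pvDrain ((buckets.getD (d, r, s) 0).toNat + 3) d r s (buckets.getD (d, r, s) 0)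
          st.1 st.2.1 st.2.2) st) st)
    ((0 : Int), rem, (0 : Int))
  st.2.2

-- ===== PRECONDITION & SPEC =====
-- A raises IndexError iff picks has fewer than 3 entries and the groups outnumber the positive
-- picks available (Python falls off the elif chain); Pre_ admits exactly the inputs where A returns:
-- either picks has the full three entries, or the 5-element mineral groups (their count is
-- ceil(len(minerals[:5*sum(picks)])/5), i.e. the slice length is ≤ 5*cap) fit in the positive picks.
def Pre_solution (picks : List Int) (minerals : List String) : Prop :=
  3 ≤ picks.length ∨
    (PySem.List.slice minerals none (some (picks.sum * 5))).length ≤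
      5 * ((picks.map (fun p => max p 0)).sum).toNat
instance (picks : List Int) (minerals : List String) : Decidable (Pre_solution picks minerals) := by
  unfold Pre_solution; infer_instance

def pvWitness_solution : List Int × List String :=
  ([1, 1, 1], ["diamond", "iron", "stone", "diamond", "stone", "iron", "iron"])

def Spec_solution (picks : List Int) (minerals : List String) (out : Int) : Prop := out = solution_alt picks minerals
instance (picks : List Int) (minerals : List String) (out : Int) : Decidable (Spec_solution picks minerals out) := by unfold Spec_solution; infer_instance

-- ===== CLAIM (what is proved, stated in full; the proofs are below) =====
def Claim_equal_solution : Prop := ∀ (picks : List Int) (minerals : List String), Dom_solution picks minerals → Pre_solution picks minerals → Spec_solution picks minerals (solution picks minerals)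

-- ===== LEMMAS AND PROOFS =====

-- ---- counting: the elif chain equals the two counts (and the remainder) ----

lemma tempStep_counts (g : List String) : ∀ a b c : Int,
    g.foldl pvTempStep (a, b, c) =
      (a + (g.count "diamond" : Int), b + (g.count "iron" : Int),
       c + (g.countP (fun e => !(e == "diamond") && !(e == "iron")) : Int)) := by
  induction g with
  | nil => intro a b c; simp
  | cons e g ih =>
    intro a b c
    simp only [List.foldl_cons, pvTempStep]
    by_cases hd : e = "diamond"
    · subst hd
      simp [ih, Prod.mk.injEq]
      omega
    · by_cases hi : e = "iron"
      · subst hi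
        simp [ih, Prod.mk.injEq, hd]
        omega
      · simp [ih, Prod.mk.injEq, hd, hi]
        omega

lemma count_split (g : List String) :
    g.count "diamond" + g.count "iron" + g.countP (fun e => !(e == "diamond") && !(e == "iron")) = g.length := by
  induction g with
  | nil => simp
  | cons e g ih =>
    by_cases hd : e = "diamond"
    · subst hd; simp; omega
    · by_cases hi : e = "iron"
      · subst hi; simp [hd]; omega
      · simp [hd, hi]; omega

-- the single group triple both ports compute
lemma temp_eq_counts (g : List String) :
    g.foldl pvTempStep ((0 : Int), (0 : Int), (0 : Int)) =
      ((PySem.List.count g "diamond" : Int), (PySem.List.count g "iron" : Int),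
       (g.length : Int) - (PySem.List.count g "diamond" : Int) - (PySem.List.count g "iron" : Int)) := by
  rw [tempStep_counts]
  have h := count_split g
  simp only [PySem.List.count_eq, Prod.mk.injEq]
  refine ⟨by omega, by omega, by omega⟩

-- ---- sorting: iterated sort-after-append equals one final sort ----

def pvSortedD (l : List (Int × Int × Int)) : Prop :=
  l.Pairwise (fun a b => pvTripLt b a = false)

lemma trip_antisymm (a b : Int × Int × Int) (h1 : pvTripLt a b = false) (h2 : pvTripLt b a = false) : a = b := by
  obtain ⟨a1, a2, a3⟩ := a
  obtain ⟨b1, b2, b3⟩ := b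
  simp [pvTripLt] at h1 h2
  simp only [Prod.mk.injEq]
  omega

lemma trip_lt_le_trans (x y z : Int × Int × Int) (h1 : pvTripLt x y = true) (h2 : pvTripLt z y = false) :
    pvTripLt z x = false := by
  obtain ⟨x1, x2, x3⟩ := x
  obtain ⟨y1, y2, y3⟩ := y
  obtain ⟨z1, z2, z3⟩ := z
  simp [pvTripLt] at h1 h2 ⊢
  omega

lemma trip_irrefl (a : Int × Int × Int) : pvTripLt a a = false := by
  obtain ⟨a1, a2, a3⟩ := a
  simp [pvTripLt]

lemma pvInsertBy_cons {α : Type} (before : α → α → Bool) (x y : α) (ys : List α) :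
    PySem.List.insertBy before x (y :: ys) =
      if before x y then x :: y :: ys else y :: PySem.List.insertBy before x ys := rfl

lemma insertBy_perm (x : Int × Int × Int) (ys : List (Int × Int × Int)) :
    (PySem.List.insertBy pvTripLt x ys).Perm (x :: ys) := by
  induction ys with
  | nil => exact List.Perm.refl _
  | cons y ys ih =>
    rw [pvInsertBy_cons]
    split
    · exact List.Perm.refl _
    · exact (ih.cons y).trans (List.Perm.swap x y ys)

lemma insertBy_sorted (x : Int × Int × Int) (ys : List (Int × Int × Int)) (h : pvSortedD ys) :
    pvSortedD (PySem.List.insertBy pvTripLt x ys) := by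
  induction ys with
  | nil =>
    rw [show PySem.List.insertBy pvTripLt x [] = [x] from rfl]
    simp [pvSortedD]
  | cons y ys ih =>
    rw [pvInsertBy_cons]
    rw [pvSortedD, List.pairwise_cons] at h
    obtain ⟨hy, hs⟩ := h
    split_ifs with hxy
    · refine List.Pairwise.cons ?_ (List.Pairwise.cons hy hs)
      intro z hz
      rcases List.mem_cons.mp hz with rfl | hz
      · exact trip_lt_le_trans x z z hxy (trip_irrefl z)
      · exact trip_lt_le_trans x y z hxy (hy z hz)
    · refine List.Pairwise.cons ?_ (ih hs)
      intro z hz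
      rcases (PySem.List.mem_insertBy pvTripLt x z ys).mp hz with rfl | hz
      · simpa using hxy
      · exact hy z hz

lemma sortDesc_foldl_perm (l : List (Int × Int × Int)) : ∀ acc,
    (l.foldl (fun acc x => PySem.List.insertBy pvTripLt x acc) acc).Perm (acc ++ l) := by
  induction l with
  | nil => intro acc; simp
  | cons x l ih =>
    intro acc
    simp only [List.foldl_cons]
    refine (ih _).trans ?_
    refine (List.Perm.append_right l (insertBy_perm x acc)).trans ?_
    exact List.perm_middle.symm

lemma sortDesc_perm (l : List (Int × Int × Int)) : (pvSortDesc l).Perm l := by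
  simpa using sortDesc_foldl_perm l []

lemma sortDesc_foldl_sorted (l : List (Int × Int × Int)) : ∀ acc, pvSortedD acc →
    pvSortedD (l.foldl (fun acc x => PySem.List.insertBy pvTripLt x acc) acc) := by
  induction l with
  | nil => intro acc h; exact h
  | cons x l ih =>
    intro acc h
    exact ih _ (insertBy_sorted x acc h)

lemma sortDesc_sorted (l : List (Int × Int × Int)) : pvSortedD (pvSortDesc l) := by
  exact sortDesc_foldl_sorted l [] (List.Pairwise.nil)

lemma sortedD_unique {l1 l2 : List (Int × Int × Int)} (hp : l1.Perm l2)
    (h1 : pvSortedD l1) (h2 : pvSortedD l2) : l1 = l2 := by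
  refine List.eq_of_perm_of_sorted ?_ h1 h2 hp
  intro a b _ _ hab hba
  exact (trip_antisymm b a hab hba).symm

lemma sortDesc_of_sorted {l : List (Int × Int × Int)} (h : pvSortedD l) : pvSortDesc l = l := by
  exact sortedD_unique (sortDesc_perm l) (sortDesc_sorted l) h

lemma sortDesc_congr_perm {l l' : List (Int × Int × Int)} (h : l.Perm l') :
    pvSortDesc l = pvSortDesc l' := by
  exact sortedD_unique ((sortDesc_perm l).trans (h.trans (sortDesc_perm l').symm))
    (sortDesc_sorted l) (sortDesc_sorted l')

lemma iter_sort {β : Type} (f : β → Int × Int × Int) (ts : List β) : ∀ acc, pvSortedD acc →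
    ts.foldl (fun arr i => pvSortDesc (arr ++ [f i])) acc = pvSortDesc (acc ++ ts.map f) := by
  induction ts with
  | nil => intro acc h; simpa using (sortDesc_of_sorted h).symm
  | cons t ts ih =>
    intro acc h
    simp only [List.foldl_cons, List.map_cons]
    rw [ih _ (sortDesc_sorted _)]
    apply sortDesc_congr_perm
    simpa [List.append_assoc] using List.Perm.append_right (ts.map f) (sortDesc_perm (acc ++ [f t]))

-- ---- A's consumption: the stateful elif chain as a three-counter consume ----

def pvSegSum (a b c : Int) (l : List (Int × Int × Int)) : Int :=
  (l.map (fun t => a * t.1 + b * t.2.1 + c * t.2.2)).sum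

def pvConsume (l : List (Int × Int × Int)) (p0 p1 p2 : Int) : Int :=
  let t0 := min p0.toNat l.length
  let t1 := min p1.toNat (l.length - t0)
  let t2 := min p2.toNat (l.length - t0 - t1)
  pvSegSum 1 1 1 (l.take t0) + pvSegSum 5 1 1 ((l.drop t0).take t1) +
    pvSegSum 25 5 1 (((l.drop t0).drop t1).take t2)

lemma consume_cons0 (x : Int × Int × Int) (l : List (Int × Int × Int)) (p0 p1 p2 : Int) (h : 0 < p0) :
    pvConsume (x :: l) p0 p1 p2 = (x.1 + x.2.1 + x.2.2) + pvConsume l (p0 - 1) p1 p2 := by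
  simp only [pvConsume, List.length_cons]
  have ht : min p0.toNat (l.length + 1) = min (p0 - 1).toNat l.length + 1 := by omega
  rw [ht, List.take_succ_cons, List.drop_succ_cons]
  have h2 : l.length + 1 - (min (p0 - 1).toNat l.length + 1) = l.length - min (p0 - 1).toNat l.length := by
    omega
  rw [h2]
  simp only [pvSegSum, List.map_cons, List.sum_cons]
  ring

lemma consume_cons1 (x : Int × Int × Int) (l : List (Int × Int × Int)) (p0 p1 p2 : Int)
    (h0 : p0 ≤ 0) (h : 0 < p1) :
    pvConsume (x :: l) p0 p1 p2 = (5 * x.1 + x.2.1 + x.2.2) + pvConsume l p0 (p1 - 1) p2 := by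
  simp only [pvConsume, List.length_cons]
  have h00 : p0.toNat = 0 := by omega
  rw [h00]
  simp only [Nat.zero_min, List.take_zero, List.drop_zero, Nat.sub_zero]
  have ht : min p1.toNat (l.length + 1) = min (p1 - 1).toNat l.length + 1 := by omega
  rw [ht, List.take_succ_cons, List.drop_succ_cons]
  have h2 : l.length + 1 - (min (p1 - 1).toNat l.length + 1) = l.length - min (p1 - 1).toNat l.length := by
    omega
  rw [h2]
  simp only [pvSegSum, List.map_cons, List.sum_cons, List.map_nil, List.sum_nil]
  ring

lemma consume_cons2 (x : Int × Int × Int) (l : List (Int × Int × Int)) (p0 p1 p2 : Int)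
    (h0 : p0 ≤ 0) (h1 : p1 ≤ 0) (h : 0 < p2) :
    pvConsume (x :: l) p0 p1 p2 = (25 * x.1 + 5 * x.2.1 + x.2.2) + pvConsume l p0 p1 (p2 - 1) := by
  simp only [pvConsume, List.length_cons]
  have h00 : p0.toNat = 0 := by omega
  have h01 : p1.toNat = 0 := by omega
  rw [h00, h01]
  simp only [Nat.zero_min, List.take_zero, List.drop_zero, Nat.sub_zero]
  have ht : min p2.toNat (l.length + 1) = min (p2 - 1).toNat l.length + 1 := by omega
  rw [ht, List.take_succ_cons]
  simp only [pvSegSum, List.map_cons, List.sum_cons, List.map_nil, List.sum_nil]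
  ring

lemma consume_nonpos (l : List (Int × Int × Int)) (p0 p1 p2 : Int)
    (h0 : p0 ≤ 0) (h1 : p1 ≤ 0) (h2 : p2 ≤ 0) : pvConsume l p0 p1 p2 = 0 := by
  have h00 : p0.toNat = 0 := by omega
  have h01 : p1.toNat = 0 := by omega
  have h02 : p2.toNat = 0 := by omega
  simp [pvConsume, pvSegSum, h00, h01, h02]

lemma pickRun (l : List (Int × Int × Int)) : ∀ (q : List Int) (res : Int),
    (l.foldl pvPickStep (q, res)).2 =
      res + pvConsume l (PySem.List.pyGetD q 0 0) (PySem.List.pyGetD q 1 0) (PySem.List.pyGetD q 2 0) := by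
  induction l with
  | nil =>
    intro q res
    simp [pvConsume, pvSegSum]
  | cons x l ih =>
    intro q res
    simp only [List.foldl_cons]
    by_cases h0 : PySem.List.pyGetD q 0 0 > 0
    · have hstep : pvPickStep (q, res) x =
          (q.set 0 (PySem.List.pyGetD q 0 0 - 1), res + x.1 + x.2.1 + x.2.2) := by
        simp [pvPickStep, h0]
      rw [hstep, ih]
      cases q with
      | nil => simp [PySem.List.pyGetD_ofNat'] at h0
      | cons a qa =>
        simp only [PySem.List.pyGetD_ofNat', List.getD_cons_zero, List.getD_cons_succ,
          List.set_cons_zero] at h0 ⊢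
        rw [consume_cons0 x l _ _ _ h0]
        ring
    · by_cases h1 : PySem.List.pyGetD q 1 0 > 0
      · have hstep : pvPickStep (q, res) x =
            (q.set 1 (PySem.List.pyGetD q 1 0 - 1), res + 5 * x.1 + x.2.1 + x.2.2) := by
          simp [pvPickStep, h0, h1]
        rw [hstep, ih]
        cases q with
        | nil => simp [PySem.List.pyGetD_ofNat'] at h1
        | cons a qa =>
          cases qa with
          | nil => simp [PySem.List.pyGetD_ofNat'] at h1
          | cons b qb =>
            simp only [PySem.List.pyGetD_ofNat', List.getD_cons_zero, List.getD_cons_succ,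
              List.set_cons_zero, List.set_cons_succ] at h0 h1 ⊢
            rw [consume_cons1 x l _ _ _ (by omega) h1]
            ring
      · by_cases h2 : PySem.List.pyGetD q 2 0 > 0
        · have hstep : pvPickStep (q, res) x =
              (q.set 2 (PySem.List.pyGetD q 2 0 - 1), res + 25 * x.1 + 5 * x.2.1 + x.2.2) := by
            simp [pvPickStep, h0, h1, h2]
          rw [hstep, ih]
          cases q with
          | nil => simp [PySem.List.pyGetD_ofNat'] at h2
          | cons a qa =>
            cases qa with
            | nil => simp [PySem.List.pyGetD_ofNat'] at h2
            | cons b qb =>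
              cases qb with
              | nil => simp [PySem.List.pyGetD_ofNat'] at h2
              | cons c qc =>
                simp only [PySem.List.pyGetD_ofNat', List.getD_cons_zero, List.getD_cons_succ,
                  List.set_cons_zero, List.set_cons_succ] at h0 h1 h2 ⊢
                rw [consume_cons2 x l _ _ _ (by omega) (by omega) h2]
                ring
        · have hstep : pvPickStep (q, res) x = (q, res) := by
            simp [pvPickStep, h0, h1, h2]
          rw [hstep, ih]
          rw [consume_nonpos l _ _ _ (by omega) (by omega) (by omega),
            consume_nonpos (x :: l) _ _ _ (by omega) (by omega) (by omega)]

-- slice with nonnegative start/length is drop-then-take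
lemma slice_seg {α : Type} (l : List α) (s t : Int) (hs : 0 ≤ s) (ht : 0 ≤ t) :
    PySem.List.slice l (some s) (some (s + t)) = (l.drop s.toNat).take t.toNat := by
  obtain ⟨sn, rfl⟩ : ∃ sn : Nat, s = (sn : Int) := ⟨s.toNat, by omega⟩
  obtain ⟨tn, rfl⟩ : ∃ tn : Nat, t = (tn : Int) := ⟨t.toNat, by omega⟩
  rw [show (sn : Int) + (tn : Int) = ((sn + tn : Nat) : Int) by push_cast; ring,
    PySem.List.slice_natCast]
  simp only [Int.toNat_natCast]
  congr 1
  omega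

-- ---- B's drain loop: batch consumption equals elementwise pvPickStep steps ----

lemma pickStep_noop (a b c total : Int) (t : Int × Int × Int)
    (ha : a ≤ 0) (hb : b ≤ 0) (hc : c ≤ 0) :
    pvPickStep ([a, b, c], total) t = ([a, b, c], total) := by
  simp only [pvPickStep, PySem.List.pyGetD_ofNat', List.getD_cons_zero, List.getD_cons_succ]
  rw [if_neg (by omega), if_neg (by omega), if_neg (by omega)]

lemma foldl_pickStep_noop (l : List (Int × Int × Int)) : ∀ (a b c total : Int),
    a ≤ 0 → b ≤ 0 → c ≤ 0 → l.foldl pvPickStep ([a, b, c], total) = ([a, b, c], total) := by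
  induction l with
  | nil => intros; rfl
  | cons t l ih =>
    intro a b c total ha hb hc
    rw [List.foldl_cons, pickStep_noop a b c total t ha hb hc, ih a b c total ha hb hc]

lemma batch0 (t : Int × Int × Int) : ∀ (k : Nat) (a b c total : Int), (k : Int) ≤ a →
    (List.replicate k t).foldl pvPickStep ([a, b, c], total) =
      ([a - k, b, c], total + k * (t.1 + t.2.1 + t.2.2)) := by
  intro k
  induction k with
  | zero => intro a b c total _; simp
  | succ k ih =>
    intro a b c total hk
    have ha : 0 < a := by omega
    rw [List.replicate_succ, List.foldl_cons]
    have hstep : pvPickStep ([a, b, c], total) t = ([a - 1, b, c], total + t.1 + t.2.1 + t.2.2) := by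
      simp only [pvPickStep, PySem.List.pyGetD_ofNat', List.getD_cons_zero, List.getD_cons_succ]
      rw [if_pos (by omega)]
      rfl
    rw [hstep, ih (a - 1) b c _ (by push_cast at hk ⊢; omega)]
    simp only [Prod.mk.injEq, List.cons.injEq, and_true, true_and]
    constructor <;> push_cast <;> ring

lemma batch1 (t : Int × Int × Int) : ∀ (k : Nat) (a b c total : Int), a ≤ 0 → (k : Int) ≤ b →
    (List.replicate k t).foldl pvPickStep ([a, b, c], total) =
      ([a, b - k, c], total + k * (5 * t.1 + t.2.1 + t.2.2)) := by
  intro k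
  induction k with
  | zero => intro a b c total _ _; simp
  | succ k ih =>
    intro a b c total ha hk
    have hb : 0 < b := by omega
    rw [List.replicate_succ, List.foldl_cons]
    have hstep : pvPickStep ([a, b, c], total) t = ([a, b - 1, c], total + 5 * t.1 + t.2.1 + t.2.2) := by
      simp only [pvPickStep, PySem.List.pyGetD_ofNat', List.getD_cons_zero, List.getD_cons_succ]
      rw [if_neg (by omega), if_pos (by omega)]
      rfl
    rw [hstep, ih a (b - 1) c _ ha (by push_cast at hk ⊢; omega)]
    simp only [Prod.mk.injEq, List.cons.injEq, and_true, true_and]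
    constructor <;> push_cast <;> ring

lemma batch2 (t : Int × Int × Int) : ∀ (k : Nat) (a b c total : Int), a ≤ 0 → b ≤ 0 → (k : Int) ≤ c →
    (List.replicate k t).foldl pvPickStep ([a, b, c], total) =
      ([a, b, c - k], total + k * (25 * t.1 + 5 * t.2.1 + t.2.2)) := by
  intro k
  induction k with
  | zero => intro a b c total _ _ _; simp
  | succ k ih =>
    intro a b c total ha hb hk
    have hc : 0 < c := by omega
    rw [List.replicate_succ, List.foldl_cons]
    have hstep : pvPickStep ([a, b, c], total) t = ([a, b, c - 1], total + 25 * t.1 + 5 * t.2.1 + t.2.2) := by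
      simp only [pvPickStep, PySem.List.pyGetD_ofNat', List.getD_cons_zero, List.getD_cons_succ]
      rw [if_neg (by omega), if_neg (by omega), if_pos (by omega)]
      rfl
    rw [hstep, ih a b (c - 1) _ ha hb (by push_cast at hk ⊢; omega)]
    simp only [Prod.mk.injEq, List.cons.injEq, and_true, true_and]
    constructor <;> push_cast <;> ring

-- with enough fuel, the drain loop consumes exactly cnt.toNat copies of (d,r,s),
-- keeping the tier invariant
lemma drain_spec (d r s : Int) : ∀ (fuel : Nat) (cnt tier a b c total : Int),
    cnt.toNat + (3 - tier).toNat ≤ fuel →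
    0 ≤ tier → tier ≤ 3 →
    (1 ≤ tier → a ≤ 0) → (2 ≤ tier → b ≤ 0) → (3 ≤ tier → c ≤ 0) →
    ∃ tier' a' b' c',
      pvDrain fuel d r s cnt tier [a, b, c] total = (tier', [a', b', c'],
        ((List.replicate cnt.toNat (d, r, s)).foldl pvPickStep ([a, b, c], total)).2) ∧
      [a', b', c'] = ((List.replicate cnt.toNat (d, r, s)).foldl pvPickStep ([a, b, c], total)).1 ∧
      0 ≤ tier' ∧ tier' ≤ 3 ∧
      (1 ≤ tier' → a' ≤ 0) ∧ (2 ≤ tier' → b' ≤ 0) ∧ (3 ≤ tier' → c' ≤ 0) := by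
  intro fuel
  induction fuel with
  | zero =>
    intro cnt tier a b c total hm h0 h3 ha hb hc
    have h00 : cnt.toNat = 0 := by omega
    rw [h00]
    exact ⟨tier, a, b, c, rfl, rfl, h0, h3, ha, hb, hc⟩
  | succ fuel ihm =>
    intro cnt tier a b c total hm h0 h3 ha hb hc
    rw [pvDrain]
    by_cases hcond : 0 < cnt ∧ tier < 3
    · have ht3 : tier < 3 := hcond.2
      rw [if_pos hcond]
      by_cases hrt : 0 < PySem.List.pyGetD [a, b, c] tier 0
      · rw [if_pos hrt]
        interval_cases tier
        · -- tier = 0: drain takes min cnt a picks of the diamond pick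
          simp only [PySem.List.pyGetD_ofNat', List.getD_cons_zero, List.getD_cons_succ,
            pvMult, Int.toNat_zero, List.set_cons_zero, one_mul] at hrt ⊢
          rw [show cnt.toNat = (min cnt a).toNat + (cnt - min cnt a).toNat by omega,
            List.replicate_add, List.foldl_append,
            batch0 (d, r, s) (min cnt a).toNat a b c total (by omega),
            show (((min cnt a).toNat : Int)) = min cnt a by omega]
          exact ihm (cnt - min cnt a) 0 (a - min cnt a) b c _ (by omega) (by omega)
            (by omega) (by omega) (by omega) (by omega)
        · -- tier = 1
          have haa : a ≤ 0 := ha (by omega)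
          simp only [PySem.List.pyGetD_ofNat', List.getD_cons_zero, List.getD_cons_succ,
            pvMult, Int.toNat_one, List.set_cons_succ, List.set_cons_zero, one_mul] at hrt ⊢
          rw [show cnt.toNat = (min cnt b).toNat + (cnt - min cnt b).toNat by omega,
            List.replicate_add, List.foldl_append,
            batch1 (d, r, s) (min cnt b).toNat a b c total haa (by omega),
            show (((min cnt b).toNat : Int)) = min cnt b by omega]
          exact ihm (cnt - min cnt b) 1 a (b - min cnt b) c _ (by omega) (by omega)
            (by omega) (by omega) (by omega) (by omega)
        · -- tier = 2
          have haa : a ≤ 0 := ha (by omega)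
          have hbb : b ≤ 0 := hb (by omega)
          simp only [PySem.List.pyGetD_ofNat', List.getD_cons_zero, List.getD_cons_succ,
            pvMult, List.set_cons_succ, List.set_cons_zero, one_mul] at hrt ⊢
          rw [show ((2 : Int).toNat) = 2 from rfl,
            show cnt.toNat = (min cnt c).toNat + (cnt - min cnt c).toNat by omega,
            List.replicate_add, List.foldl_append,
            batch2 (d, r, s) (min cnt c).toNat a b c total haa hbb (by omega),
            show (((min cnt c).toNat : Int)) = min cnt c by omega]
          exact ihm (cnt - min cnt c) 2 a b (c - min cnt c) _ (by omega) (by omega)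
            (by omega) (by omega) (by omega) (by omega)
      · rw [if_neg hrt]
        interval_cases tier
        · simp only [PySem.List.pyGetD_ofNat', List.getD_cons_zero] at hrt
          exact ihm cnt 1 a b c total (by omega) (by omega) (by omega) (by omega)
            (by omega) (by omega)
        · have haa : a ≤ 0 := ha (by omega)
          simp only [PySem.List.pyGetD_ofNat', List.getD_cons_zero, List.getD_cons_succ] at hrt
          exact ihm cnt 2 a b c total (by omega) (by omega) (by omega) (by omega)
            (by omega) (by omega)
        · have haa : a ≤ 0 := ha (by omega)
          have hbb : b ≤ 0 := hb (by omega)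
          simp only [PySem.List.pyGetD_ofNat', List.getD_cons_zero, List.getD_cons_succ] at hrt
          exact ihm cnt 3 a b c total (by omega) (by omega) (by omega) (by omega)
            (by omega) (by omega)
    · rw [if_neg hcond]
      by_cases hc0 : cnt ≤ 0
      · have h00 : cnt.toNat = 0 := by omega
        rw [h00]
        exact ⟨tier, a, b, c, rfl, rfl, h0, h3, ha, hb, hc⟩
      · have ht3 : tier = 3 := by omega
        subst ht3
        rw [foldl_pickStep_noop _ a b c total (ha (by omega)) (hb (by omega)) (hc (by omega))]
        exact ⟨3, a, b, c, rfl, rfl, by omega, by omega, ha, hb, hc⟩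

-- running the drain over a list of keys consumes the concatenation of the replicates
lemma run_keys (get : Int × Int × Int → Int) (ks : List (Int × Int × Int)) :
    ∀ (tier a b c total : Int),
    0 ≤ tier → tier ≤ 3 →
    (1 ≤ tier → a ≤ 0) → (2 ≤ tier → b ≤ 0) → (3 ≤ tier → c ≤ 0) →
    ∃ tier' a' b' c',
      ks.foldl (fun st t => pvDrain ((get t).toNat + 3) t.1 t.2.1 t.2.2 (get t) st.1 st.2.1 st.2.2) (tier, [a, b, c], total) =
        (tier', [a', b', c'],
          ((ks.flatMap (fun t => List.replicate (get t).toNat t)).foldl pvPickStep ([a, b, c], total)).2) ∧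
      [a', b', c'] = ((ks.flatMap (fun t => List.replicate (get t).toNat t)).foldl pvPickStep ([a, b, c], total)).1 ∧
      0 ≤ tier' ∧ tier' ≤ 3 ∧
      (1 ≤ tier' → a' ≤ 0) ∧ (2 ≤ tier' → b' ≤ 0) ∧ (3 ≤ tier' → c' ≤ 0) := by
  induction ks with
  | nil =>
    intro tier a b c total h0 h3 ha hb hc
    exact ⟨tier, a, b, c, rfl, rfl, h0, h3, ha, hb, hc⟩
  | cons t ks ih =>
    obtain ⟨t1, t2, t3⟩ := t
    intro tier a b c total h0 h3 ha hb hc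
    obtain ⟨tier1, a1, b1, c1, heq1, hrem1, h01, h31, ha1, hb1, hc1⟩ :=
      drain_spec t1 t2 t3 ((get (t1, t2, t3)).toNat + 3) (get (t1, t2, t3)) tier a b c total (by omega) h0 h3 ha hb hc
    obtain ⟨tier2, a2, b2, c2, heq2, hrem2, h02, h32, ha2, hb2, hc2⟩ :=
      ih tier1 a1 b1 c1
        (((List.replicate (get (t1, t2, t3)).toNat ((t1 : Int), (t2 : Int), (t3 : Int))).foldl
          pvPickStep ([a, b, c], total)).2) h01 h31 ha1 hb1 hc1
    have hX : (([a1, b1, c1] : List Int),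
        ((List.replicate (get (t1, t2, t3)).toNat ((t1 : Int), (t2 : Int), (t3 : Int))).foldl
          pvPickStep ([a, b, c], total)).2) =
        (List.replicate (get (t1, t2, t3)).toNat ((t1 : Int), (t2 : Int), (t3 : Int))).foldl
          pvPickStep ([a, b, c], total) := by
      rw [hrem1]
    refine ⟨tier2, a2, b2, c2, ?_, ?_, h02, h32, ha2, hb2, hc2⟩
    · simp only [List.foldl_cons]
      rw [heq1, heq2, List.flatMap_cons, List.foldl_append, hX]
    · rw [hrem2, List.flatMap_cons, List.foldl_append, hX]

-- ---- counts dict and the descending key walk ----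

lemma bucket_getD {T : Type} [BEq T] [LawfulBEq T] (f : Int → T) (R : List Int) (t : T) :
    (R.foldl (fun b i => b.insert (f i) (b.getD (f i) 0 + 1))
        (PySem.Dict.empty : PySem.Dict T Int)).getD t 0 = ((R.map f).count t : Int) := by
  have h : (R.foldl (fun b i => b.insert (f i) (b.getD (f i) 0 + 1))
      (PySem.Dict.empty : PySem.Dict T Int)) =
      ((R.map f).foldl (fun d x => d.modify x 0 (· + 1)) PySem.Dict.empty) := by
    rw [List.foldl_map]
    rfl
  rw [h, PySem.Dict.getD_foldl_modify_add_one]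
  simp

def pvK : List (Int × Int × Int) :=
  (PySem.List.pyRange 5 (-1) (-1)).flatMap (fun d =>
    (PySem.List.pyRange 5 (-1) (-1)).flatMap (fun r =>
      (PySem.List.pyRange 5 (-1) (-1)).map (fun s => (d, r, s))))

set_option maxRecDepth 40000 in
lemma pvK_nodup : pvK.Nodup := by decide

set_option maxRecDepth 40000 in
lemma pvK_sorted : pvK.Pairwise (fun t u => pvTripLt u t = false) := by decide

lemma pvK_mem (d r s : Int) (hd0 : 0 ≤ d) (hd5 : d ≤ 5) (hr0 : 0 ≤ r) (hr5 : r ≤ 5)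
    (hs0 : 0 ≤ s) (hs5 : s ≤ 5) : (d, r, s) ∈ pvK := by
  have hRange : PySem.List.pyRange 5 (-1) (-1) = [5, 4, 3, 2, 1, 0] := by decide
  simp only [pvK, hRange, List.mem_flatMap, List.mem_map]
  refine ⟨d, ?_, r, ?_, s, ?_, rfl⟩ <;> simp <;> omega

lemma count_flatMap_replicate (g : List (Int × Int × Int)) (x : Int × Int × Int) :
    ∀ K : List (Int × Int × Int), K.Nodup →
    (K.flatMap (fun t => List.replicate (g.count t) t)).count x = if x ∈ K then g.count x else 0 := by
  intro K
  induction K with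
  | nil => intro _; simp
  | cons t K ih =>
    intro hnd
    have htK := (List.nodup_cons.mp hnd).1
    rw [List.flatMap_cons, List.count_append, ih (List.nodup_cons.mp hnd).2]
    by_cases hxt : x = t
    · subst hxt
      simp [List.count_replicate, htK]
    · simp [List.count_replicate, hxt]
      intro h
      exact absurd h.symm hxt

lemma flatMap_replicate_perm (K : List (Int × Int × Int)) (g : List (Int × Int × Int))
    (hN : K.Nodup) (hmem : ∀ x ∈ g, x ∈ K) :
    (K.flatMap (fun t => List.replicate (g.count t) t)).Perm g := by
  rw [List.perm_iff_count]
  intro x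
  rw [count_flatMap_replicate g x K hN]
  by_cases hx : x ∈ K
  · simp [hx]
  · simp only [hx, if_false]
    exact (List.count_eq_zero.mpr (fun h => hx (hmem x h))).symm

lemma flatMap_replicate_sorted (K : List (Int × Int × Int)) (n : (Int × Int × Int) → Nat)
    (hK : K.Pairwise (fun t u => pvTripLt u t = false)) :
    pvSortedD (K.flatMap (fun t => List.replicate (n t) t)) := by
  induction K with
  | nil => exact List.Pairwise.nil
  | cons t K ih =>
    rw [List.flatMap_cons]
    rw [List.pairwise_cons] at hK
    refine List.pairwise_append.mpr ⟨?_, ih hK.2, ?_⟩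
    · exact (List.pairwise_replicate).mpr (Or.inr (trip_irrefl t))
    · intro x hx y hy
      obtain ⟨u, hu, hy'⟩ := List.mem_flatMap.mp hy
      rw [List.eq_of_mem_replicate hx, List.eq_of_mem_replicate hy']
      exact hK.1 u hu

-- the triple nested range walk is a single fold over the descending key list pvK
lemma nested3 (get : Int × Int × Int → Int) (init : Int × List Int × Int) :
    (PySem.List.pyRange 5 (-1) (-1)).foldl (fun st d =>
      (PySem.List.pyRange 5 (-1) (-1)).foldl (fun st r =>
        (PySem.List.pyRange 5 (-1) (-1)).foldl (fun st s =>
          pvDrain ((get (d, r, s)).toNat + 3) d r s (get (d, r, s)) st.1 st.2.1 st.2.2) st) st) init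
    = pvK.foldl (fun st t => pvDrain ((get t).toNat + 3) t.1 t.2.1 t.2.2 (get t) st.1 st.2.1 st.2.2) init := by
  unfold pvK
  simp only [List.foldl_flatMap, List.foldl_map]

-- ===== VERDICT (by name: the statement is the Claim_ definition above) =====
theorem solution_spec : Claim_equal_solution := by
  intro picks minerals _ _
  unfold Spec_solution solution solution_alt
  dsimp only
  rw [iter_sort (fun i => (PySem.List.slice minerals (some i) (some (i + 5))).foldl pvTempStep
      ((0 : Int), (0 : Int), (0 : Int))) _ [] List.Pairwise.nil]
  simp only [temp_eq_counts, List.nil_append]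
  rw [pickRun]
  -- B's rem list is [picks[0] or 0, picks[1] or 0, picks[2] or 0] = the three pyGetD defaults
  have e0 : (if (0 : Int) < (picks.length : Int) then PySem.List.pyGetD picks 0 0 else 0) =
      PySem.List.pyGetD picks 0 0 := by
    split_ifs with h
    · rfl
    · rw [PySem.List.pyGetD_ofNat', List.getD_eq_default]
      show picks.length ≤ 0
      omega
  have e1 : (if (1 : Int) < (picks.length : Int) then PySem.List.pyGetD picks 1 0 else 0) =
      PySem.List.pyGetD picks 1 0 := by
    split_ifs with h
    · rfl
    · rw [PySem.List.pyGetD_ofNat', List.getD_eq_default]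
      show picks.length ≤ 1
      omega
  have e2 : (if (2 : Int) < (picks.length : Int) then PySem.List.pyGetD picks 2 0 else 0) =
      PySem.List.pyGetD picks 2 0 := by
    split_ifs with h
    · rfl
    · rw [PySem.List.pyGetD_ofNat', List.getD_eq_default]
      show picks.length ≤ 2
      omega
  rw [show PySem.List.pyRange 0 3 1 = [0, 1, 2] from by decide]
  simp only [List.map_cons, List.map_nil]
  rw [e0, e1, e2]
  simp only [bucket_getD]
  set f1 : Int → Int × Int × Int := fun i =>
    (((PySem.List.count (PySem.List.slice minerals (some i) (some (i + 5))) "diamond" : Nat) : Int),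
      ((PySem.List.count (PySem.List.slice minerals (some i) (some (i + 5))) "iron" : Nat) : Int),
      ((PySem.List.slice minerals (some i) (some (i + 5))).length : Int) -
        ((PySem.List.count (PySem.List.slice minerals (some i) (some (i + 5))) "diamond" : Nat) : Int) -
        ((PySem.List.count (PySem.List.slice minerals (some i) (some (i + 5))) "iron" : Nat) : Int)) with hf1
  set R := PySem.List.pyRange 0
      ((PySem.List.slice minerals none (some (picks.sum * 5))).length) 5 with hR
  have hn := nested3 (fun t => (((List.map f1 R).count t : Nat) : Int))
      ((0 : Int), [PySem.List.pyGetD picks 0 0, PySem.List.pyGetD picks 1 0,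
        PySem.List.pyGetD picks 2 0], (0 : Int))
  rw [hn]
  obtain ⟨tier', a', b', c', heq, -, -, -, -, -, -⟩ :=
    run_keys (fun t => (((List.map f1 R).count t : Nat) : Int)) pvK 0 (PySem.List.pyGetD picks 0 0)
      (PySem.List.pyGetD picks 1 0) (PySem.List.pyGetD picks 2 0) 0 (by omega) (by omega)
      (by omega) (by omega) (by omega)
  rw [heq]
  dsimp only
  rw [pickRun]
  simp only [PySem.List.pyGetD_ofNat', List.getD_cons_zero, List.getD_cons_succ, Int.toNat_natCast]
  -- the replicate-expansion of the counts dict along pvK IS the descending sort of the groups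
  have hmem : ∀ x ∈ List.map f1 R, x ∈ pvK := by
    intro x hx
    obtain ⟨i, hi, rfl⟩ := List.mem_map.mp hx
    rw [hR] at hi
    have hi0 : 0 ≤ i := by
      rcases (PySem.List.mem_pyRange_iff_of_pos (by omega) i).mp hi with ⟨h1, -, -⟩
      omega
    have hg : PySem.List.slice minerals (some i) (some (i + 5)) =
        (minerals.drop i.toNat).take (5 : Int).toNat := slice_seg minerals i 5 hi0 (by omega)
    have hlen : (PySem.List.slice minerals (some i) (some (i + 5))).length ≤ 5 := by
      rw [hg]
      simpa using List.length_take_le _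
    have hsum := count_split (PySem.List.slice minerals (some i) (some (i + 5)))
    have hd := List.count_le_length (l := PySem.List.slice minerals (some i) (some (i + 5)))
      (a := "diamond")
    have hr := List.count_le_length (l := PySem.List.slice minerals (some i) (some (i + 5)))
      (a := "iron")
    simp only [hf1, PySem.List.count_eq]
    apply pvK_mem <;> push_cast <;> omega
  rw [sortedD_unique
    ((flatMap_replicate_perm pvK _ pvK_nodup hmem).trans (sortDesc_perm _).symm)
    (flatMap_replicate_sorted pvK _ pvK_sorted) (sortDesc_sorted _)]
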